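-- pv_equiv track=rewrite | github.com/cleanthis-michael/PSYC2301 | Coursework1 - Parsing & Summarizing Data.py | deriveParticipantsPerDateDictionary
-- ===== SOURCE A (Python) =====
-- def deriveParticipantsPerDateDictionary(listOfDates):
--     datesAndParticipantsDictionary = {}  # will contain each date with its corresponding number of participants
--
--     for participantDate in listOfDates:
--         # If the date is not already inside the dictionary, it is added and its value is set at 1
--         # This is because the first time the date is encountered constitutes the first participant completing the experiment on that date
--         if participantDate not in datesAndParticipantsDictionary:
--             datesAndParticipantsDictionary[participantDate] = 1
--
--         # Instead, if the date is already inside the dictionary, its value increases by 1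
--         # This is because another participant is encountered who completed the experiment on that date
--         else:
--             datesAndParticipantsDictionary[participantDate] += 1
--
--     return datesAndParticipantsDictionary
-- ===== SOURCE B (Python) =====
-- def deriveParticipantsPerDateDictionary(listOfDates):
--     # Two staged passes: first collect the distinct dates in first-appearance
--     # order, then build the dictionary in one comprehension, each date mapped
--     # to its full count in the input list.
--     distinctDates = list(dict.fromkeys(listOfDates))
--     return {date: listOfDates.count(date) for date in distinctDates}
-- ===== Notes on version B (the rewrite author's own statement) =====
-- stated objective: alternative
-- what changed: Replaces A's single accumulating pass (increment a dict value per element) with two staged passes: dedup the list via dict.fromkeys to get distinct dates in first-appearance order, then a dict comprehension mapping each date to listOfDates.count(date); keys, values and insertion order are identical.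
import Mathlib
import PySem

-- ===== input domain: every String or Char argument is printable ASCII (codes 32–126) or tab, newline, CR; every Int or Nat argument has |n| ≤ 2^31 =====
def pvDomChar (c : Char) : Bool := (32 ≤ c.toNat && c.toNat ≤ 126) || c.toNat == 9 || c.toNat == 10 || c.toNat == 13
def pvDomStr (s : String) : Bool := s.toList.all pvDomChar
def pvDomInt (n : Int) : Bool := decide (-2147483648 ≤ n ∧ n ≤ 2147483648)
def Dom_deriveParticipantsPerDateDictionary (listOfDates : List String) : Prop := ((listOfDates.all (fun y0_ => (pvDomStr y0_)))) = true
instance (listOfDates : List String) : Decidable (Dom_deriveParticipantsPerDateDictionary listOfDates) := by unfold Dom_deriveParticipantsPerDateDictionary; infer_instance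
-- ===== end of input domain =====

-- B replaces A's single accumulating pass (increment a dict value per element) with
-- two staged passes: dedup via dict.fromkeys, then a dict comprehension mapping each
-- distinct date to its full list.count — an alternative, not faster, decomposition.

-- ===== PORT A =====
-- A: one pass over the list, incrementing the date's counter on each encounter.
def deriveParticipantsPerDateDictionary (listOfDates : List String) : List (String × Int) :=
  (listOfDates.foldl
    (fun d participantDate =>
      if d.contains participantDate = false then
        d.insert participantDate 1
      else
        -- d[k] += 1 ; the key is present here, so getD reads the stored value exactly
        d.insert participantDate (d.getD participantDate 0 + 1))
    PySem.Dict.empty).items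

-- ===== PORT B =====
-- B: distinctDates = list(dict.fromkeys(listOfDates)); then the dict comprehension.
-- Its keys (PySem.List.dedup) are distinct, so the comprehension's items are
-- exactly these pairs in this order.
def deriveParticipantsPerDateDictionary_alt (listOfDates : List String) : List (String × Int) :=
  (PySem.List.dedup listOfDates).map
    (fun date => (date, (listOfDates.count date : Int)))

-- ===== PRECONDITION & SPEC =====
def Spec_deriveParticipantsPerDateDictionary (listOfDates : List String) (out : List (String × Int)) : Prop := out = deriveParticipantsPerDateDictionary_alt listOfDates
instance (listOfDates : List String) (out : List (String × Int)) : Decidable (Spec_deriveParticipantsPerDateDictionary listOfDates out) := by unfold Spec_deriveParticipantsPerDateDictionary; infer_instance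

-- ===== CLAIM (what is proved, stated in full; the proofs are below) =====
def Claim_equal_deriveParticipantsPerDateDictionary : Prop := ∀ (listOfDates : List String), Dom_deriveParticipantsPerDateDictionary listOfDates → Spec_deriveParticipantsPerDateDictionary listOfDates (deriveParticipantsPerDateDictionary listOfDates)

-- ===== LEMMAS AND PROOFS =====

-- A's loop body is exactly the Counter step: when the key is absent, getD returns 0,
-- so "insert 1" and "insert (getD + 1)" coincide.
theorem aStep_eq_counterStep (d : PySem.Dict String Int) (x : String) :
    (if d.contains x = false then d.insert x 1 else d.insert x (d.getD x 0 + 1))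
      = d.insert x (d.getD x 0 + 1) := by
  by_cases h : d.contains x = false
  · rw [if_pos h, PySem.Dict.getD_of_not_contains d 0 h]
    norm_num
  · rw [if_neg h]

-- A computes Counter(listOfDates).items.
theorem portA_eq_counter_items (l : List String) :
    deriveParticipantsPerDateDictionary l = (PySem.Dict.counter l).items := by
  unfold deriveParticipantsPerDateDictionary
  have hf : (fun (d : PySem.Dict String Int) (x : String) =>
      if d.contains x = false then d.insert x 1 else d.insert x (d.getD x 0 + 1))
      = fun d x => d.insert x (d.getD x 0 + 1) := by
    funext d x; exact aStep_eq_counterStep d x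
  rw [hf, PySem.Dict.foldl_insert_getD_add_one_eq_counter]

-- ===== VERDICT (by name: the statement is the Claim_ definition above) =====
theorem deriveParticipantsPerDateDictionary_spec : Claim_equal_deriveParticipantsPerDateDictionary := by
  intro l _
  unfold Spec_deriveParticipantsPerDateDictionary
  rw [portA_eq_counter_items, PySem.Dict.items_counter]
  unfold deriveParticipantsPerDateDictionary_alt
  rw [PySem.List.dedup_eq_ofList]
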